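-- pv_equiv track=rewrite | github.com/oyiptong/semantic_chunker | chunker.py | get_line_and_char_from_offset
-- ===== SOURCE A (Python) =====
-- from typing import List, Dict, Any
--
-- def get_line_and_char_from_offset(offset: int, line_offsets: List[int]) -> (int, int):
--     """Converts a character offset to line number and character number within that line."""
--     if not line_offsets:
--         return 1, offset + 1 # Handle empty file case
--
--     # Find the largest line offset less than or equal to the given offset
--     line_index = 0
--     # Iterate up to the second to last element to avoid index out of bounds when checking i+1
--     for i in range(len(line_offsets) - 1):
--         if line_offsets[i+1] > offset:
--             line_index = i
--             break
--     # If the loop finishes without finding a larger offset, the offset is in the last line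
--     # This check is needed because the loop goes up to len(line_offsets) - 1
--     if offset >= line_offsets[-1]:
--          line_index = len(line_offsets) - 1
--
--
--     line_number = line_index + 1 # Line numbers are 1-based
--     char_number = offset - line_offsets[line_index] + 1 # Character numbers are 1-based
--     return line_number, char_number
-- ===== SOURCE B (Python) =====
-- def get_line_and_char_from_offset(offset, line_offsets):
--     """Converts a character offset to line number and character number within that line."""
--     if not line_offsets:
--         return 1, offset + 1
--     # binary search: lo becomes bisect_right(line_offsets, offset)
--     lo, hi = 0, len(line_offsets)
--     while lo < hi:
--         mid = (lo + hi) // 2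
--         if offset < line_offsets[mid]:
--             hi = mid
--         else:
--             lo = mid + 1
--     line_index = max(lo - 1, 0)
--     return line_index + 1, offset - line_offsets[line_index] + 1
-- ===== Notes on version B (the rewrite author's own statement) =====
-- stated objective: alternative
-- what changed: Replaces A's linear scan over line_offsets (plus a trailing last-line override) with a single hand-rolled binary search (bisect_right, clamped to 0) on the sorted offset table: O(log n) index lookups instead of a worst-case O(n) scan.
-- outside the precondition, e.g. on get_line_and_char_from_offset(-1, [-1, 0, -1]): A returns (3, 1), B returns (1, 1)
import Mathlib
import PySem

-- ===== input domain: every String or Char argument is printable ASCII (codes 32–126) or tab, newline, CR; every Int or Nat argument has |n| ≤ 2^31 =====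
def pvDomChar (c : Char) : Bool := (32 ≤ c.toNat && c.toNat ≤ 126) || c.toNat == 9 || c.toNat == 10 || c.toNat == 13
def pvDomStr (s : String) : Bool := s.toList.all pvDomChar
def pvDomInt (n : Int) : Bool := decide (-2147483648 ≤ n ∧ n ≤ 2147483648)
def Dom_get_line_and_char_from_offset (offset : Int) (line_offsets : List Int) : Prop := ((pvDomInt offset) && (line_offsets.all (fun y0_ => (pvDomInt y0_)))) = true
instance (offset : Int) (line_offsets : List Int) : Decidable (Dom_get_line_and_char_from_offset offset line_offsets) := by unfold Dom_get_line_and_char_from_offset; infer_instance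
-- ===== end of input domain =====

-- B replaces A's linear scan for the line index by a hand-rolled binary search (bisect_right,
-- clamped to 0); equivalence is proved on Pre_: nondecreasing offset tables (the natural domain)
-- plus any table with the offset outside its value range.

-- ===== PORT A =====
-- the 'for i in range(len(line_offsets)-1): if line_offsets[i+1] > offset: line_index = i; break'
-- loop; every index the loop reads is in range, so pyGetD with default 0 is exact here
def pvALoop (offset : Int) (los : List Int) : List Int → Int
  | [] => 0
  | i :: rest =>
      if PySem.List.pyGetD los (i + 1) 0 > offset then i else pvALoop offset los rest

def get_line_and_char_from_offset (offset : Int) (line_offsets : List Int) : Int × Int :=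
  if line_offsets = [] then (1, offset + 1)
  else
    let li0 := pvALoop offset line_offsets (PySem.List.pyRange 0 ((line_offsets.length : Int) - 1))
    -- line_offsets[-1]: the list is nonempty here, so pyGetD is exact
    let li := if offset ≥ PySem.List.pyGetD line_offsets (-1) 0 then (line_offsets.length : Int) - 1 else li0
    (li + 1, offset - PySem.List.pyGetD line_offsets li 0 + 1)

-- ===== PORT B =====
-- Source B's while-loop binary search; lo, hi stay in [0, len], so Nat (lo+hi)/2 is Python's (lo+hi)//2
def pvBisect (offset : Int) (los : List Int) (lo hi : Nat) : Nat :=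
  if lo < hi then
    let mid := (lo + hi) / 2
    if offset < PySem.List.pyGetD los (mid : Int) 0 then pvBisect offset los lo mid
    else pvBisect offset los (mid + 1) hi
  else lo
termination_by hi - lo
decreasing_by all_goals omega

def get_line_and_char_from_offset_alt (offset : Int) (line_offsets : List Int) : Int × Int :=
  if line_offsets = [] then (1, offset + 1)
  else
    let lo := pvBisect offset line_offsets 0 line_offsets.length
    let li : Int := max ((lo : Int) - 1) 0
    (li + 1, offset - PySem.List.pyGetD line_offsets li 0 + 1)

-- ===== PRECONDITION & SPEC =====
-- Pre_ excludes unsorted offset tables with offset strictly inside their value range — outside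
-- the natural domain (line_offsets are cumulative line-start offsets), where A's scan order picks
-- an accidental index and binary search picks another; nondecreasing tables, and any table with
-- offset below every entry or at/above every entry, are admitted.
def Pre_get_line_and_char_from_offset (offset : Int) (line_offsets : List Int) : Prop :=
  List.Pairwise (· ≤ ·) line_offsets ∨
  (∀ x ∈ line_offsets, offset < x) ∨ (∀ x ∈ line_offsets, x ≤ offset)
instance (offset : Int) (line_offsets : List Int) : Decidable (Pre_get_line_and_char_from_offset offset line_offsets) := by unfold Pre_get_line_and_char_from_offset; infer_instance

def pvWitness_get_line_and_char_from_offset : Int × List Int := (3, [0, 2, 5])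

def Spec_get_line_and_char_from_offset (offset : Int) (line_offsets : List Int) (out : Int × Int) : Prop := out = get_line_and_char_from_offset_alt offset line_offsets
instance (offset : Int) (line_offsets : List Int) (out : Int × Int) : Decidable (Spec_get_line_and_char_from_offset offset line_offsets out) := by unfold Spec_get_line_and_char_from_offset; infer_instance

-- ===== CLAIM (what is proved, stated in full; the proofs are below) =====
def Claim_equal_get_line_and_char_from_offset : Prop := ∀ (offset : Int) (line_offsets : List Int), Dom_get_line_and_char_from_offset offset line_offsets → Pre_get_line_and_char_from_offset offset line_offsets → Spec_get_line_and_char_from_offset offset line_offsets (get_line_and_char_from_offset offset line_offsets)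

-- ===== LEMMAS AND PROOFS =====

-- sorted ⇒ getElem is monotone
theorem pvMono (los : List Int) (hs : List.Pairwise (· ≤ ·) los) :
    ∀ (i j : Nat) (hj : j < los.length) (hij : i ≤ j), los[i]'(by omega) ≤ los[j] := by
  intro i j hj hij
  rcases Nat.lt_or_ge i j with h | h
  · exact (List.pairwise_iff_getElem.mp hs) i j (by omega) hj h
  · have : i = j := by omega
    subst this; exact le_refl _

-- invariant of Source B's binary search: it returns the bisect_right insertion point
theorem pvBisect_spec (offset : Int) (los : List Int) (hs : List.Pairwise (· ≤ ·) los) :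
    ∀ (fuel lo hi : Nat), hi - lo ≤ fuel → lo ≤ hi → hi ≤ los.length →
    (∀ i (h : i < los.length), i < lo → los[i] ≤ offset) →
    (∀ i (h : i < los.length), hi ≤ i → offset < los[i]) →
    lo ≤ pvBisect offset los lo hi ∧ pvBisect offset los lo hi ≤ hi ∧
    (∀ i (h : i < los.length), i < pvBisect offset los lo hi → los[i] ≤ offset) ∧
    (∀ i (h : i < los.length), pvBisect offset los lo hi ≤ i → offset < los[i]) := by
  intro fuel
  induction fuel with
  | zero =>
      intro lo hi hf hlh hhn h1 h2
      have heq : lo = hi := by omega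
      rw [pvBisect]
      simp only [heq, lt_irrefl, if_false]
      exact ⟨le_refl _, le_refl _, fun i h hi => h1 i h (by omega), fun i h hi => h2 i h (by omega)⟩
  | succ f ih =>
      intro lo hi hf hlh hhn h1 h2
      rw [pvBisect]
      by_cases hlt : lo < hi
      · simp only [hlt, if_true]
        have hmn : (lo + hi) / 2 < los.length := by omega
        rw [PySem.List.pyGetD_natCast, List.getD_eq_getElem _ _ hmn]
        by_cases hc : offset < los[(lo + hi) / 2]
        · simp only [hc, if_true]
          have := ih lo ((lo + hi) / 2) (by omega) (by omega) (by omega) h1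
            (fun i h hi => lt_of_lt_of_le hc (pvMono los hs _ i h hi))
          exact ⟨this.1, by omega, this.2.2.1, this.2.2.2⟩
        · simp only [hc, if_false]
          have := ih ((lo + hi) / 2 + 1) hi (by omega) (by omega) hhn
            (fun i h hi => le_trans (pvMono los hs i _ hmn (by omega)) (by omega)) h2
          exact ⟨by omega, this.2.1, this.2.2.1, this.2.2.2⟩
      · simp only [hlt, if_false]
        have heq : lo = hi := by omega
        exact ⟨le_refl _, hlh, fun i h hi => h1 i h hi, fun i h hi => h2 i h (by omega)⟩

-- A's loop breaks exactly at r - 1 when los[r] is the first entry above offset (1 ≤ r ≤ n - 1)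
theorem pvALoop_stops (offset : Int) (los : List Int) (r : Nat)
    (hr1 : 1 ≤ r) (hrn : r + 1 ≤ los.length)
    (hbreak : offset < los[r]'(by omega))
    (hbefore : ∀ i (h : i < los.length), 0 < i → i < r → los[i] ≤ offset) :
    ∀ (fuel a : Nat), r - 1 - a ≤ fuel → a ≤ r - 1 →
      pvALoop offset los (PySem.List.pyRange (a : Int) ((los.length : Int) - 1)) = (r : Int) - 1 := by
  intro fuel
  induction fuel with
  | zero =>
      intro a hf ha
      have haeq : a = r - 1 := by omega
      subst haeq
      rw [PySem.List.pyRange_one_cons (by omega), pvALoop]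
      have hcast : ((r - 1 : Nat) : Int) + 1 = ((r : Nat) : Int) := by omega
      rw [hcast, PySem.List.pyGetD_natCast, List.getD_eq_getElem _ _ (by omega)]
      simp only [hbreak, if_true]
      omega
  | succ f ih =>
      intro a hf ha
      by_cases hend : a = r - 1
      · subst hend
        rw [PySem.List.pyRange_one_cons (by omega), pvALoop]
        have hcast : ((r - 1 : Nat) : Int) + 1 = ((r : Nat) : Int) := by omega
        rw [hcast, PySem.List.pyGetD_natCast, List.getD_eq_getElem _ _ (by omega)]
        simp only [hbreak, if_true]
        omega
      · rw [PySem.List.pyRange_one_cons (by omega), pvALoop]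
        have hcast : ((a : Nat) : Int) + 1 = ((a + 1 : Nat) : Int) := by omega
        rw [hcast, PySem.List.pyGetD_natCast, List.getD_eq_getElem _ _ (by omega)]
        have hle : los[a + 1]'(by omega) ≤ offset := hbefore (a + 1) (by omega) (by omega) (by omega)
        simp only [not_lt.mpr hle, if_false]
        exact ih (a + 1) (by omega) (by omega)

-- A's loop returns 0 when already los[1] exceeds offset
theorem pvALoop_zero (offset : Int) (los : List Int)
    (hn : 2 ≤ los.length) (h1 : offset < los[1]'(by omega)) :
    pvALoop offset los (PySem.List.pyRange 0 ((los.length : Int) - 1)) = 0 := by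
  rw [show (0 : Int) = ((0 : Nat) : Int) by simp,
      PySem.List.pyRange_one_cons (by omega), pvALoop]
  rw [show ((0 : Nat) : Int) + 1 = ((1 : Nat) : Int) by simp,
      PySem.List.pyGetD_natCast, List.getD_eq_getElem _ _ (by omega)]
  simp [h1]

-- los[-1] is the last element
theorem pvLast (los : List Int) (hn : 1 ≤ los.length) :
    PySem.List.pyGetD los (-1) 0 = los[los.length - 1]'(by omega) := by
  have h1 : ¬ (0:Int) ≤ -1 := by norm_num
  have h2 : -(los.length:Int) ≤ -1 := by omega
  simp only [PySem.List.pyGetD, PySem.List.pyGet?, PySem.List.pyIdx?, h1, if_false, h2, if_true]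
  simp [List.getElem?_eq_getElem (by omega : los.length - 1 < los.length)]

-- binary search returns lo when offset is below every entry
theorem pvBisect_allLT (offset : Int) (los : List Int)
    (h : ∀ i (h : i < los.length), offset < los[i]) :
    ∀ (fuel lo hi : Nat), hi - lo ≤ fuel → hi ≤ los.length → pvBisect offset los lo hi = lo := by
  intro fuel
  induction fuel with
  | zero =>
      intro lo hi hf hhn
      rw [pvBisect]
      simp only [show ¬ lo < hi by omega, if_false]
  | succ f ih =>
      intro lo hi hf hhn
      rw [pvBisect]
      by_cases hlt : lo < hi
      · simp only [hlt, if_true]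
        have hmn : (lo + hi) / 2 < los.length := by omega
        rw [PySem.List.pyGetD_natCast, List.getD_eq_getElem _ _ hmn]
        simp only [h _ hmn, if_true]
        exact ih lo ((lo + hi) / 2) (by omega) (by omega)
      · simp only [hlt, if_false]

-- binary search returns hi when every entry is ≤ offset
theorem pvBisect_allGE (offset : Int) (los : List Int)
    (h : ∀ i (h : i < los.length), los[i] ≤ offset) :
    ∀ (fuel lo hi : Nat), hi - lo ≤ fuel → lo ≤ hi → hi ≤ los.length → pvBisect offset los lo hi = hi := by
  intro fuel
  induction fuel with
  | zero =>
      intro lo hi hf hlh hhn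
      rw [pvBisect]
      simp only [show ¬ lo < hi by omega, if_false]
      omega
  | succ f ih =>
      intro lo hi hf hlh hhn
      rw [pvBisect]
      by_cases hlt : lo < hi
      · simp only [hlt, if_true]
        have hmn : (lo + hi) / 2 < los.length := by omega
        rw [PySem.List.pyGetD_natCast, List.getD_eq_getElem _ _ hmn]
        simp only [show ¬ offset < los[(lo + hi) / 2] from not_lt.mpr (h _ hmn), if_false]
        exact ih ((lo + hi) / 2 + 1) hi (by omega) (by omega) hhn
      · simp only [hlt, if_false]
        omega

-- the common core: A's final index equals B's, given B's bisect result and its two properties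
theorem pvMain (offset : Int) (los : List Int) (hnil : ¬ los = [])
    (hr_le : pvBisect offset los 0 los.length ≤ los.length)
    (hr_lo : ∀ i (h : i < los.length), i < pvBisect offset los 0 los.length → los[i] ≤ offset)
    (hr_hi : ∀ i (h : i < los.length), pvBisect offset los 0 los.length ≤ i → offset < los[i]) :
    get_line_and_char_from_offset offset los = get_line_and_char_from_offset_alt offset los := by
  have hn : 1 ≤ los.length := by
    cases los with | nil => exact absurd rfl hnil | cons a t => simp
  set r := pvBisect offset los 0 los.length with hrdef
  unfold get_line_and_char_from_offset get_line_and_char_from_offset_alt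
  simp only [hnil, if_false, ← hrdef]
  rw [pvLast los hn]
  by_cases hlast : offset ≥ los[los.length - 1]'(by omega)
  · -- offset in the last line: A overrides to n-1; r must be n
    have hr_eq : r = los.length := by
      by_contra hne
      exact absurd (hr_hi (los.length - 1) (by omega) (by omega)) (by omega)
    simp only [hlast, if_true]
    have : max ((r : Int) - 1) 0 = (los.length : Int) - 1 := by
      rw [hr_eq]; omega
    rw [this]
  · simp only [hlast, if_false]
    have hlast' : offset < los[los.length - 1]'(by omega) := by omega
    have hr_len : r ≤ los.length - 1 := by
      by_contra hgt
      exact absurd (hr_lo (los.length - 1) (by omega) (by omega)) (by omega)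
    by_cases hr0 : r = 0
    · -- first entry already exceeds offset (or single line): both indices are 0
      have hmax : max ((r : Int) - 1) 0 = 0 := by rw [hr0]; simp
      rw [hmax]
      rcases Nat.lt_or_ge los.length 2 with h2 | h2
      · have hlen1 : los.length = 1 := by omega
        have : ((los.length : Int) - 1) = 0 := by rw [hlen1]; simp
        rw [this]
        simp [PySem.List.pyRange, pvALoop]
      · rw [pvALoop_zero offset los h2 (hr_hi 1 (by omega) (by omega))]
    · -- 1 ≤ r ≤ n-1: A's loop breaks at r-1
      have hstops := pvALoop_stops offset los r (by omega) (by omega)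
        (hr_hi r (by omega) (le_refl _))
        (fun i h h0 hir => hr_lo i h hir)
        (r - 1) 0 (by omega) (by omega)
      rw [show ((0 : Nat) : Int) = 0 by simp] at hstops
      rw [hstops]
      have : max ((r : Int) - 1) 0 = (r : Int) - 1 := by omega
      rw [this]

-- ===== VERDICT (by name: the statement is the Claim_ definition above) =====
theorem get_line_and_char_from_offset_spec : Claim_equal_get_line_and_char_from_offset := by
  intro offset los _ hpre
  unfold Spec_get_line_and_char_from_offset
  by_cases hnil : los = []
  · simp [get_line_and_char_from_offset, get_line_and_char_from_offset_alt, hnil]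
  · rcases hpre with hs | hlt | hge
    · obtain ⟨-, h1, h2, h3⟩ := pvBisect_spec offset los hs los.length 0 los.length (by omega)
        (by omega) (le_refl _) (fun i h hi => absurd hi (by omega))
        (fun i h hi => absurd hi (by omega))
      exact pvMain offset los hnil h1 h2 h3
    · have h := pvBisect_allLT offset los (fun i hi => hlt _ (los.getElem_mem hi))
        los.length 0 los.length (by omega) (le_refl _)
      exact pvMain offset los hnil (h.le.trans (Nat.zero_le _))
        (fun i hI hi => absurd (h ▸ hi) (Nat.not_lt_zero i))
        (fun i hI hi => hlt _ (los.getElem_mem hI))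
    · have h := pvBisect_allGE offset los (fun i hi => hge _ (los.getElem_mem hi))
        los.length 0 los.length (by omega) (by omega) (le_refl _)
      exact pvMain offset los hnil h.le
        (fun i hI hi => hge _ (los.getElem_mem hI))
        (fun i hI hi => absurd (h ▸ hi) (by omega))
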